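-- pv_equiv track=rewrite | github.com/shiraz-30/Sorting-and-Searching | Sorting and Searching/sorting_searching_problems/photocopies.py | printing_copies
-- ===== SOURCE A (Python) =====
-- def good(mid, n, x, y):
-- 	return (mid // x) + (mid // y) >= n - 1
--
-- def printing_copies(n, x, y):
-- 	if n == 1:
-- 		return min(x, y)
--
-- 	low = 0
-- 	high = max(x, y) * n
--
-- 	while low <= high:
-- 		mid = low + (high - low) // 2
--
-- 		if good(mid, n, x, y):
-- 			ans = mid
-- 			high = mid - 1
-- 		else:
-- 			low = mid + 1
--
-- 	return ans + min(x, y)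
-- ===== SOURCE B (Python) =====
-- def printing_copies(n, x, y):
--     # Closed-form jump near (n-1)*x*y/(x+y) plus an O(1) local candidate scan,
--     # instead of A's binary search.
--     k = n - 1
--     lo = (k * x * y) // (x + y)
--     cands = [((lo + p - 1) // p) * p + i * p for p in (x, y) for i in range(6)]
--     goods = [t for t in cands if t // x + t // y >= k]
--     return min(goods) + min(x, y)
-- ===== Notes on version B (the rewrite author's own statement) =====
-- stated objective: alternative
-- what changed: A binary-searches for the smallest t with t//x + t//y >= n-1; B jumps directly to the closed-form lower bound lo = (n-1)*x*y//(x+y) and picks the answer from a constant-size list of the next six multiples of x and of y above lo, with no search loop at all.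
-- outside the precondition, e.g. on printing_copies(1, 0, 0): A returns 0, B raises ZeroDivisionError; on printing_copies(-1, -2, -3): A returns -3, B returns -18; on printing_copies(1, -5, 3): A returns -5, B returns -5
import Mathlib
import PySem

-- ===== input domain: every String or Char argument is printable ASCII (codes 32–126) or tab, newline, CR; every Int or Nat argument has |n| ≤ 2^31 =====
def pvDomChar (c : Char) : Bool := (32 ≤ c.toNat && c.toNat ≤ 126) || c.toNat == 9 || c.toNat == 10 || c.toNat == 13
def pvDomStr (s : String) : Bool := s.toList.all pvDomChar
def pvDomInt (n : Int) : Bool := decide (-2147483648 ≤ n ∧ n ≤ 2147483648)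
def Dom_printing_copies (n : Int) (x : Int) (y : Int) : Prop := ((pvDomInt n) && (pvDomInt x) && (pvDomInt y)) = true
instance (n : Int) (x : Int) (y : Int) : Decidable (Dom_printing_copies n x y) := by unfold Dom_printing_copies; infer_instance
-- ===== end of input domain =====

-- B replaces A's binary search by an O(1) closed-form jump to lo = (n-1)·x·y//(x+y)
-- followed by a constant-size candidate scan over the next few multiples of x and of y.

-- ===== PORT A =====
-- port of A's helper `good`
def pvGoodA (mid : Int) (n : Int) (x : Int) (y : Int) : Bool :=
  decide (PySem.Int.floordiv mid x + PySem.Int.floordiv mid y ≥ n - 1)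

-- the line `mid = low + (high - low) // 2`
def pvMid (low : Int) (high : Int) : Int := low + PySem.Int.floordiv (high - low) 2

lemma pvMid_bounds (low high : Int) (h : low ≤ high) : low ≤ pvMid low high ∧ pvMid low high ≤ high := by
  have h0 : (0:Int) ≤ PySem.Int.floordiv (high - low) 2 :=
    (PySem.Int.le_floordiv_iff_mul_le (by norm_num)).mpr (by omega)
  have h1 : PySem.Int.floordiv (high - low) 2 < (high - low) + 1 :=
    (PySem.Int.floordiv_lt_iff_lt_mul (by norm_num)).mpr (by omega)
  unfold pvMid; omega

-- A's `while low <= high` loop; `ans` is Option since Python leaves it unbound until first set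
def pvLoopA (n : Int) (x : Int) (y : Int) (low : Int) (high : Int) (ans : Option Int) : Option Int :=
  if _h : low ≤ high then
    if pvGoodA (pvMid low high) n x y then pvLoopA n x y low (pvMid low high - 1) (some (pvMid low high))
    else pvLoopA n x y (pvMid low high + 1) high ans
  else ans
termination_by (high + 1 - low).toNat
decreasing_by
  all_goals have := pvMid_bounds low high (by omega)
  all_goals omega

def printing_copies (n : Int) (x : Int) (y : Int) : Int :=
  if n = 1 then min x y
  else
    match pvLoopA n x y 0 (max x y * n) none with
    | some ans => ans + min x y
    | none => 0   -- Python raises UnboundLocalError here; unreachable under Pre_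

-- ===== PORT B =====
-- `lo = (k * x * y) // (x + y)` with k = n - 1
def pvLo (n : Int) (x : Int) (y : Int) : Int :=
  PySem.Int.floordiv ((n - 1) * x * y) (x + y)

-- `cands = [((lo + p - 1) // p) * p + i * p for p in (x, y) for i in range(6)]`
def pvCands (n : Int) (x : Int) (y : Int) : List Int :=
  [x, y].flatMap (fun p =>
    (PySem.List.pyRange 0 6 1).map (fun i =>
      PySem.Int.floordiv (pvLo n x y + p - 1) p * p + i * p))

-- `goods = [t for t in cands if t // x + t // y >= k]`
def pvGoods (n : Int) (x : Int) (y : Int) : List Int :=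
  (pvCands n x y).filter (fun t =>
    decide (PySem.Int.floordiv t x + PySem.Int.floordiv t y ≥ n - 1))

def printing_copies_alt (n : Int) (x : Int) (y : Int) : Int :=
  match PySem.List.min? (pvGoods n x y) (fun t => t) with
  | some m => m + min x y
  | none => 0   -- Python's min([]) ValueError; unreachable under Pre_

-- ===== PRECONDITION & SPEC =====
-- Pre_ restricts to the task's natural domain (nonnegative copy count, positive machine
-- times): outside it A raises ZeroDivisionError (x or y = 0), raises UnboundLocalError
-- (the loop never finds a "good" mid, e.g. n < 0), or returns accidental values of a
-- binary search over a non-monotone predicate (negative x or y).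
def Pre_printing_copies (n : Int) (x : Int) (y : Int) : Prop := 0 ≤ n ∧ 1 ≤ x ∧ 1 ≤ y
instance (n : Int) (x : Int) (y : Int) : Decidable (Pre_printing_copies n x y) := by
  unfold Pre_printing_copies; infer_instance
def pvWitness_printing_copies : Int × Int × Int := (4, 1, 2)

def Spec_printing_copies (n : Int) (x : Int) (y : Int) (out : Int) : Prop := out = printing_copies_alt n x y
instance (n : Int) (x : Int) (y : Int) (out : Int) : Decidable (Spec_printing_copies n x y out) := by unfold Spec_printing_copies; infer_instance

-- ===== CLAIM (what is proved, stated in full; the proofs are below) =====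
def Claim_equal_printing_copies : Prop := ∀ (n : Int) (x : Int) (y : Int), Dom_printing_copies n x y → Pre_printing_copies n x y → Spec_printing_copies n x y (printing_copies n x y)

-- ===== LEMMAS AND PROOFS =====

-- the predicate A searches over, and "L is the least point satisfying it"
def pvG (n x y t : Int) : Prop := n - 1 ≤ PySem.Int.floordiv t x + PySem.Int.floordiv t y
def pvIsL (n x y L : Int) : Prop := pvG n x y L ∧ ∀ t, t < L → ¬ pvG n x y t

lemma pvG_dec (n x y t : Int) :
    (decide (PySem.Int.floordiv t x + PySem.Int.floordiv t y ≥ n - 1) = true) ↔ pvG n x y t := by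
  simp [pvG, ge_iff_le]

lemma fdiv_mul_le (t x : Int) (hx : 0 < x) : PySem.Int.floordiv t x * x ≤ t :=
  (PySem.Int.le_floordiv_iff_mul_le hx).mp le_rfl

lemma lt_fdiv_succ_mul (t x : Int) (hx : 0 < x) : t < (PySem.Int.floordiv t x + 1) * x :=
  (PySem.Int.floordiv_lt_iff_lt_mul hx).mp (by omega)

lemma fdiv_mono (x : Int) (hx : 0 < x) {t t' : Int} (h : t ≤ t') :
    PySem.Int.floordiv t x ≤ PySem.Int.floordiv t' x := by
  refine (PySem.Int.le_floordiv_iff_mul_le hx).mpr ?_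
  exact le_trans (fdiv_mul_le t x hx) h

lemma pvG_mono (n x y : Int) (hx : 0 < x) (hy : 0 < y) {t t' : Int} (h : t ≤ t')
    (hg : pvG n x y t) : pvG n x y t' := by
  have h1 := fdiv_mono x hx h
  have h2 := fdiv_mono y hy h
  unfold pvG at *; omega

lemma pvG_neg (n x y t : Int) (hx : 0 < x) (hy : 0 < y) (hn : 0 ≤ n) (ht : t < 0) :
    ¬ pvG n x y t := by
  have h1 : PySem.Int.floordiv t x < 0 := (PySem.Int.floordiv_lt_iff_lt_mul hx).mpr (by omega)
  have h2 : PySem.Int.floordiv t y < 0 := (PySem.Int.floordiv_lt_iff_lt_mul hy).mpr (by omega)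
  unfold pvG; omega

lemma pvIsL_unique (n x y L L' : Int) (h : pvIsL n x y L) (h' : pvIsL n x y L') : L = L' := by
  rcases h with ⟨hg, hmin⟩; rcases h' with ⟨hg', hmin'⟩
  by_contra hne
  rcases lt_or_gt_of_ne hne with hlt | hlt
  · exact hmin' L hlt hg
  · exact hmin L' hlt hg'

-- binary-search loop invariant: pvLoopA returns the least good point
lemma loopA_spec (n x y : Int) (hx : 0 < x) (hy : 0 < y) :
    ∀ low high ans,
      (∀ t, t < low → ¬ pvG n x y t) →
      (ans = none → pvG n x y high) →
      (∀ a, ans = some a → pvG n x y a ∧ a = high + 1) →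
      ∃ r, pvLoopA n x y low high ans = some r ∧ pvIsL n x y r := by
  intro low high ans
  induction low, high, ans using pvLoopA.induct n x y with
  | case1 low high ans hlh hgood ih =>
    intro h1 h2 h3
    have hg : pvG n x y (pvMid low high) := (pvG_dec n x y (pvMid low high)).mp hgood
    rw [pvLoopA]
    rw [dif_pos hlh, if_pos hgood]
    exact ih h1 (by intro h; cases h)
      (by rintro a ⟨rfl⟩; exact ⟨hg, by omega⟩)
  | case2 low high ans hlh hgood ih =>
    intro h1 h2 h3
    have hmid := pvMid_bounds low high hlh
    have hbad : ¬ pvG n x y (pvMid low high) :=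
      fun hgt => hgood ((pvG_dec n x y (pvMid low high)).mpr hgt)
    rw [pvLoopA]
    rw [dif_pos hlh, if_neg hgood]
    refine ih ?_ h2 h3
    intro t ht hgt
    by_cases hlow : t < low
    · exact h1 t hlow hgt
    · exact hbad (pvG_mono n x y hx hy (by omega) hgt)
  | case3 low high ans hlh =>
    intro h1 h2 h3
    rw [pvLoopA]
    rw [dif_neg hlh]
    match ans, h2, h3 with
    | none, h2, _ =>
      exact absurd (h2 rfl) (h1 high (by omega))
    | some a, _, h3 =>
      rcases h3 a rfl with ⟨hga, hahigh⟩
      exact ⟨a, rfl, hga, fun t ht => h1 t (by omega)⟩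

-- existence of the least good point (via the loop itself, started as A starts it)
lemma exists_pvIsL (n x y : Int) (hx : 0 < x) (hy : 0 < y) (hn : 0 ≤ n) :
    ∃ L, pvIsL n x y L := by
  have hgh : pvG n x y (max x y * n) := by
    have hx' : n * x ≤ max x y * n := by
      calc n * x = x * n := by ring
      _ ≤ max x y * n := by
        exact mul_le_mul_of_nonneg_right (le_max_left x y) hn
    have hy' : n * y ≤ max x y * n := by
      calc n * y = y * n := by ring
      _ ≤ max x y * n := by
        exact mul_le_mul_of_nonneg_right (le_max_right x y) hn
    have h1 : n ≤ PySem.Int.floordiv (max x y * n) x :=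
      (PySem.Int.le_floordiv_iff_mul_le hx).mpr hx'
    have h2 : n ≤ PySem.Int.floordiv (max x y * n) y :=
      (PySem.Int.le_floordiv_iff_mul_le hy).mpr hy'
    unfold pvG; omega
  obtain ⟨r, _, hr⟩ := loopA_spec n x y hx hy 0 (max x y * n) none
    (fun t ht => pvG_neg n x y t hx hy hn ht) (fun _ => hgh) (by simp)
  exact ⟨r, hr⟩

-- A computes L + min x y
lemma A_eq (n x y L : Int) (hx : 0 < x) (hy : 0 < y) (hn : 0 ≤ n) (hL : pvIsL n x y L) :
    printing_copies n x y = L + min x y := by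
  unfold printing_copies
  by_cases h1 : n = 1
  · subst h1
    have hg0 : pvG 1 x y 0 := by
      have a1 : PySem.Int.floordiv 0 x = 0 := (PySem.Int.floordiv_eq_iff_of_pos hx).mpr (by constructor <;> omega)
      have a2 : PySem.Int.floordiv 0 y = 0 := (PySem.Int.floordiv_eq_iff_of_pos hy).mpr (by constructor <;> omega)
      unfold pvG; omega
    have : L = 0 := pvIsL_unique 1 x y L 0 hL
      ⟨hg0, fun t ht => pvG_neg 1 x y t hx hy (by omega) ht⟩
    simp [this]
  · simp only [h1]
    have hgh : pvG n x y (max x y * n) := by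
      have hx' : n ≤ PySem.Int.floordiv (max x y * n) x :=
        (PySem.Int.le_floordiv_iff_mul_le hx).mpr (by nlinarith [le_max_left x y])
      have hy' : n ≤ PySem.Int.floordiv (max x y * n) y :=
        (PySem.Int.le_floordiv_iff_mul_le hy).mpr (by nlinarith [le_max_right x y])
      unfold pvG; omega
    obtain ⟨r, heq, hr⟩ := loopA_spec n x y hx hy 0 (max x y * n) none
      (fun t ht => pvG_neg n x y t hx hy hn ht) (fun _ => hgh) (by simp)
    rw [heq]
    simp [pvIsL_unique n x y L r hL hr]

-- if p does not divide t, t and t-1 have the same floor quotient by p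
lemma fdiv_pred_eq (t p : Int) (hp : 0 < p) (hnd : ¬ p ∣ t) :
    PySem.Int.floordiv (t - 1) p = PySem.Int.floordiv t p := by
  have h1 := fdiv_mul_le t p hp
  have h2 := lt_fdiv_succ_mul t p hp
  have hne : PySem.Int.floordiv t p * p ≠ t := by
    intro h; exact hnd ⟨PySem.Int.floordiv t p, by linarith [h.symm] ⟩
  refine (PySem.Int.floordiv_eq_iff_of_pos hp).mpr ⟨by omega, by omega⟩

-- the jump point lo is a lower bound for the least good point
lemma lo_le_L (n x y L : Int) (hx : 0 < x) (hy : 0 < y) (hGL : pvG n x y L) :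
    pvLo n x y ≤ L := by
  have f1 : PySem.Int.floordiv L x * x ≤ L := fdiv_mul_le L x hx
  have f2 : PySem.Int.floordiv L y * y ≤ L := fdiv_mul_le L y hy
  have hk : n - 1 ≤ PySem.Int.floordiv L x + PySem.Int.floordiv L y := hGL
  have hs : (0:Int) < x + y := by omega
  have key : (n - 1) * x * y ≤ L * (x + y) := by
    nlinarith [mul_le_mul_of_nonneg_right hk (mul_pos hx hy).le,
      mul_le_mul_of_nonneg_right f1 hy.le, mul_le_mul_of_nonneg_right f2 hx.le]
  have h2 : PySem.Int.floordiv (L * (x + y)) (x + y) = L :=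
    (PySem.Int.floordiv_eq_iff_of_pos hs).mpr ⟨le_rfl, by nlinarith⟩
  calc pvLo n x y ≤ PySem.Int.floordiv (L * (x + y)) (x + y) := by
        unfold pvLo; exact fdiv_mono (x + y) hs key
    _ = L := h2

-- lo + 2*min(x,y) + 2 is already good, so it bounds the least good point from above
lemma L_le_T (n x y L : Int) (hx : 0 < x) (hy : 0 < y) (hL : pvIsL n x y L) :
    L ≤ pvLo n x y + 2 * min x y + 2 := by
  set T := pvLo n x y + 2 * min x y + 2 with hT
  have hGT : pvG n x y T := by
    by_contra hnT
    have hsum : PySem.Int.floordiv T x + PySem.Int.floordiv T y ≤ n - 2 := by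
      unfold pvG at hnT; omega
    have t1 : T < (PySem.Int.floordiv T x + 1) * x := lt_fdiv_succ_mul T x hx
    have t2 : T < (PySem.Int.floordiv T y + 1) * y := lt_fdiv_succ_mul T y hy
    have hs : (0:Int) < x + y := by omega
    have hlo1 : (n - 1) * x * y < (pvLo n x y + 1) * (x + y) := by
      have := lt_fdiv_succ_mul ((n - 1) * x * y) (x + y) hs
      unfold pvLo; linarith
    have hmxy : x * y ≤ min x y * (x + y) := by
      rcases min_cases x y with ⟨hm, hle⟩ | ⟨hm, hle⟩ <;> rw [hm] <;> nlinarith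
    have hmx : min x y ≤ x := min_le_left x y
    nlinarith [mul_lt_mul_of_pos_left t1 hy, mul_lt_mul_of_pos_left t2 hx,
      mul_le_mul_of_nonneg_left hsum (mul_pos hx hy).le, hlo1, hmxy]
  by_contra hlt
  exact hL.2 T (by omega) hGT

-- the least good point is a multiple of x or of y
lemma dvd_L (n x y L : Int) (hx : 0 < x) (hy : 0 < y) (hn : 0 ≤ n) (hL : pvIsL n x y L) :
    x ∣ L ∨ y ∣ L := by
  by_cases hL0 : L = 0
  · exact Or.inl (by simp [hL0])
  · have hL0' : 0 ≤ L := by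
      by_contra h
      exact pvG_neg n x y L hx hy hn (by omega) hL.1
    by_contra hboth
    rw [not_or] at hboth
    have e1 := fdiv_pred_eq L x hx hboth.1
    have e2 := fdiv_pred_eq L y hy hboth.2
    have : pvG n x y (L - 1) := by
      have hg := hL.1
      unfold pvG at hg ⊢; rw [e1, e2]; exact hg
    exact hL.2 (L - 1) (by omega) this

-- if the least good point is a multiple of p ∈ {x,y}, it is among B's six candidates for p
lemma mem_cands_of_dvd (n x y L p : Int) (hp : 0 < p) (hpe : p = x ∨ p = y) (hdvd : p ∣ L)
    (hx : 0 < x) (hy : 0 < y) (hL : pvIsL n x y L) : L ∈ pvCands n x y := by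
  obtain ⟨c, hc⟩ := hdvd
  have hloL : pvLo n x y ≤ L := lo_le_L n x y L hx hy hL.1
  have hLT : L ≤ pvLo n x y + 2 * min x y + 2 := L_le_T n x y L hx hy hL
  set lo := pvLo n x y with hlo
  set q := PySem.Int.floordiv (lo + p - 1) p with hq
  have hm0lo : lo ≤ q * p := by
    have h := lt_fdiv_succ_mul (lo + p - 1) p hp
    have hexp : (PySem.Int.floordiv (lo + p - 1) p + 1) * p = q * p + p := by rw [← hq]; ring
    rw [hexp] at h; linarith
  have hqc : q ≤ c := by
    have h2 : q < c + 1 := by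
      rw [hq]
      refine (PySem.Int.floordiv_lt_iff_lt_mul hp).mpr ?_
      have : (c + 1) * p = L + p := by rw [hc]; ring
      rw [this]; linarith
    omega
  have hm0L : q * p ≤ L := by
    have h := mul_le_mul_of_nonneg_right hqc hp.le
    have : c * p = L := by rw [hc]; ring
    linarith
  have hmp : min x y ≤ p := by
    rcases hpe with h | h
    · rw [h]; exact min_le_left x y
    · rw [h]; exact min_le_right x y
  have hub : L - q * p ≤ 5 * p := by linarith
  have hip : L - q * p = (c - q) * p := by rw [hc]; ring
  have hi5 : c - q ≤ 5 := by
    have h : (c - q) * p ≤ 5 * p := by linarith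
    exact le_of_mul_le_mul_right h hp
  refine List.mem_flatMap.mpr ⟨p, ?_, ?_⟩
  · rcases hpe with h | h <;> rw [h] <;> simp
  · refine List.mem_map.mpr ⟨c - q, ?_, ?_⟩
    · exact (PySem.List.mem_pyRange_one).mpr ⟨by omega, by omega⟩
    · show q * p + (c - q) * p = L
      linarith

-- the least good point occurs among B's candidates
lemma L_mem_cands (n x y L : Int) (hx : 0 < x) (hy : 0 < y) (hn : 0 ≤ n)
    (hL : pvIsL n x y L) : L ∈ pvCands n x y := by
  rcases dvd_L n x y L hx hy hn hL with hdvd | hdvd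
  · exact mem_cands_of_dvd n x y L x hx (Or.inl rfl) hdvd hx hy hL
  · exact mem_cands_of_dvd n x y L y hy (Or.inr rfl) hdvd hx hy hL

-- B computes L + min x y
lemma B_eq (n x y L : Int) (hx : 0 < x) (hy : 0 < y) (hn : 0 ≤ n) (hL : pvIsL n x y L) :
    printing_copies_alt n x y = L + min x y := by
  have hmemc : L ∈ pvCands n x y := L_mem_cands n x y L hx hy hn hL
  have hmemg : L ∈ pvGoods n x y := by
    refine List.mem_filter.mpr ⟨hmemc, ?_⟩
    exact (pvG_dec n x y L).mpr hL.1
  unfold printing_copies_alt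
  rcases hmin : PySem.List.min? (pvGoods n x y) (fun t => t) with _ | m
  · rw [PySem.List.min?_eq_none_iff] at hmin
    rw [hmin] at hmemg
    cases hmemg
  · have hmmem : m ∈ pvGoods n x y := PySem.List.min?_mem hmin
    have hGm : pvG n x y m := (pvG_dec n x y m).mp (List.mem_filter.mp hmmem).2
    have h1 : L ≤ m := by
      by_contra h
      exact hL.2 m (by omega) hGm
    have h2 : m ≤ L := PySem.List.min?_isMin hmin L hmemg
    show m + min x y = L + min x y
    omega

-- ===== VERDICT (by name: the statement is the Claim_ definition above) =====
theorem printing_copies_spec : Claim_equal_printing_copies := by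
  intro n x y _ hpre
  rcases hpre with ⟨hn, hx, hy⟩
  obtain ⟨L, hL⟩ := exists_pvIsL n x y (by omega) (by omega) hn
  unfold Spec_printing_copies
  rw [A_eq n x y L (by omega) (by omega) hn hL, B_eq n x y L (by omega) (by omega) hn hL]
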